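-- pv_equiv track=rewrite | github.com/rodriguez/Switch-Scraper | reddit_switch_script.py | price_parser
-- ===== SOURCE A (Python) =====
-- def price_parser(title):
-- 	price = 0
-- 	money_indices = []
-- 	iter_title = title
-- 	money_index = iter_title.find("$")
-- 	while money_index != -1:
-- 		ints = money_index+1
-- 		string = ""
-- 		while ints < len(iter_title) and iter_title[ints].isdigit() == True:
-- 			string += iter_title[ints]
-- 			ints += 1
-- 		if string != "":
-- 			money_indices.append(int(string))
-- 		money_index = iter_title.find("$", ints)
-- 	if len(money_indices) != 0:
-- 		price = max(money_indices)
-- 	return price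
-- ===== SOURCE B (Python) =====
-- def price_parser(title):
--     # One left-to-right pass: hand-rolled scanner collecting each maximal digit
--     # run that directly follows a '$', then one max over their int values.
--     runs = []
--     cur = None  # digit run in progress since the last '$', else None
--     for ch in title:
--         if ch == '$':
--             if cur:
--                 runs.append(cur)
--             cur = ""
--         elif cur is not None and ch.isdigit():
--             cur += ch
--         else:
--             if cur:
--                 runs.append(cur)
--             cur = None
--     if cur:
--         runs.append(cur)
--     return max(map(int, runs), default=0)
-- ===== Notes on version B (the rewrite author's own statement) =====
-- stated objective: alternative
-- what changed: Replaces A's repeated str.find outer loop with a nested character-indexing digit loop by a single left-to-right scan over the characters that maintains the digit run in progress after each dollar sign, collecting every completed run and taking one max with default 0.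
import Mathlib
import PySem

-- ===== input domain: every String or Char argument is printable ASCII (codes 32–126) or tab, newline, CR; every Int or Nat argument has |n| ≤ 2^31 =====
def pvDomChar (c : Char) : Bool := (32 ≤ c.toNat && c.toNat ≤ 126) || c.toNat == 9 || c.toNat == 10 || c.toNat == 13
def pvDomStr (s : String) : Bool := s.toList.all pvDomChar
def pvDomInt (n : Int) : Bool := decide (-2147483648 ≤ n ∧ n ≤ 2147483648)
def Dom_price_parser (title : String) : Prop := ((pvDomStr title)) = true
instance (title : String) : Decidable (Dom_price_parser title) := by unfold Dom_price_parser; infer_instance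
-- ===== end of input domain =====

-- B replaces A's repeated str.find outer loop with inner digit loop by a single left-to-right
-- scan that collects each maximal digit run following a dollar sign (objective: alternative).

-- ===== PORT A =====
-- inner while loop: while ints < len(iter_title) and iter_title[ints].isdigit(): string += iter_title[ints]; ints += 1
def scanDigits (cs : List Char) (ints : Nat) (string : List Char) : List Char × Nat :=
  if h : ints < cs.length then
    if PySem.Chars.isdigit cs[ints] then
      scanDigits cs (ints + 1) (string ++ [cs[ints]])
    else (string, ints)
  else (string, ints)
termination_by cs.length - ints
decreasing_by exact Nat.sub_succ_lt_self _ _ h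

-- outer while loop: money_index = find(dollar, ·); scan digits; append int(string); find again.
-- fuel only makes the same computation total: each iteration moves the search start strictly
-- right, so fuel = cs.length + 1 is never exhausted (proved in the lemmas below).
def loopA (cs : List Char) : Nat → Nat → List Int → List Int
  | 0, _, acc => acc
  | fuel + 1, start, acc =>
    let mi := PySem.Chars.findFrom cs ['$'] (start : Int) none
    if mi = -1 then acc
    else
      let sd := scanDigits cs (mi + 1).toNat []
      loopA cs fuel sd.2 (if sd.1 ≠ [] then acc ++ [(PySem.Int.ofChars? sd.1).getD 0] else acc)

def price_parser (title : String) : Int :=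
  let cs := title.toList
  let moneyIndices := loopA cs (cs.length + 1) 0 []
  if moneyIndices.length ≠ 0 then
    (PySem.List.max? moneyIndices (fun x => x)).getD 0
  else 0

-- ===== PORT B =====
-- body of B's for-loop: state = (completed digit runs, run in progress since the last dollar sign)
def stepB (st : List (List Char) × Option (List Char)) (c : Char) :
    List (List Char) × Option (List Char) :=
  if c = '$' then
    (match st.2 with
     | some r => if r ≠ [] then st.1 ++ [r] else st.1
     | none => st.1, some [])
  else
    match st.2 with
    | some r =>
      if PySem.Chars.isdigit c then (st.1, some (r ++ [c]))
      else (if r ≠ [] then st.1 ++ [r] else st.1, none)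
    | none => (st.1, none)

def price_parser_alt (title : String) : Int :=
  let st := title.toList.foldl stepB ([], none)
  let runs : List (List Char) :=
    match st.2 with
    | some r => if r ≠ [] then st.1 ++ [r] else st.1
    | none => st.1
  PySem.List.maxD (runs.map (fun r => (PySem.Int.ofChars? r).getD 0)) (fun x => x) 0

-- ===== PRECONDITION & SPEC =====
def Spec_price_parser (title : String) (out : Int) : Prop := out = price_parser_alt title
instance (title : String) (out : Int) : Decidable (Spec_price_parser title out) := by unfold Spec_price_parser; infer_instance

-- ===== CLAIM (what is proved, stated in full; the proofs are below) =====
def Claim_equal_price_parser : Prop := ∀ (title : String), Dom_price_parser title → Spec_price_parser title (price_parser title)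

-- ===== LEMMAS AND PROOFS =====

-- the "if cur: runs.append(cur)" finalisation shared by B's three exits
def finishRuns (st : List (List Char) × Option (List Char)) : List (List Char) :=
  match st.2 with
  | some r => if r ≠ [] then st.1 ++ [r] else st.1
  | none => st.1

theorem singleton_prefix_iff (a : Char) (t : List Char) : [a] <+: t ↔ t.head? = some a := by
  cases t with
  | nil => simp
  | cons b t => simp [List.cons_prefix_cons, eq_comm]

theorem singleton_infix_iff (a : Char) (t : List Char) : [a] <:+: t ↔ a ∈ t := by
  constructor
  · rintro ⟨s, u, rfl⟩; simp
  · intro h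
    obtain ⟨s, u, rfl⟩ := List.append_of_mem h
    exact ⟨s, u, by simp⟩

theorem dropWhile_eq_drop_len (p : Char → Bool) (l : List Char) :
    l.dropWhile p = l.drop (l.takeWhile p).length := by
  induction l with
  | nil => simp
  | cons c t ih => by_cases h : p c <;> simp [List.takeWhile_cons, h, ih]

theorem dropWhile_head_cases (p : Char → Bool) (l : List Char) :
    l.dropWhile p = [] ∨ ∃ c t, l.dropWhile p = c :: t ∧ ¬ p c := by
  induction l with
  | nil => simp
  | cons c t ih =>
    by_cases h : p c
    · simpa [h] using ih
    · exact Or.inr ⟨c, t, by simp [List.dropWhile_cons, h], h⟩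

theorem scanDigits_eq (cs : List Char) (ints : Nat) (string : List Char) :
    scanDigits cs ints string =
      (string ++ (cs.drop ints).takeWhile PySem.Chars.isdigit,
       ints + ((cs.drop ints).takeWhile PySem.Chars.isdigit).length) := by
  fun_induction scanDigits cs ints string with
  | case1 ints string h hd ih =>
    rw [ih, List.drop_eq_getElem_cons h, List.takeWhile_cons, if_pos hd]
    simp; omega
  | case2 ints string h hd =>
    rw [List.drop_eq_getElem_cons h, List.takeWhile_cons, if_neg hd]
    simp
  | case3 ints string h =>
    rw [List.drop_eq_nil_of_le (by omega)]
    simp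

-- facts about str.find(dollar, start) when it succeeds
theorem findFrom_dollar_facts (cs : List Char) (start : Nat)
    (h : PySem.Chars.findFrom cs ['$'] (start : Int) none ≠ -1) :
    start ≤ cs.length ∧ 0 ≤ PySem.Chars.findFrom cs ['$'] (start : Int) none ∧
    start ≤ (PySem.Chars.findFrom cs ['$'] (start : Int) none).toNat ∧
    (PySem.Chars.findFrom cs ['$'] (start : Int) none).toNat < cs.length ∧
    cs[(PySem.Chars.findFrom cs ['$'] (start : Int) none).toNat]? = some '$' ∧
    (∀ j, start ≤ j → j < (PySem.Chars.findFrom cs ['$'] (start : Int) none).toNat →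
      cs[j]? ≠ some '$') := by
  have hle : start ≤ cs.length := by
    by_contra hgt
    apply h
    simp only [PySem.Chars.findFrom]
    have : (cs.length : Int) < (start : Int) := by exact_mod_cast Nat.lt_of_not_le hgt
    simp only [if_neg (by omega : ¬ (start : Int) < 0)]
    rw [if_pos this]
  refine ⟨hle, ?_⟩
  rw [PySem.Chars.findFrom_natCast cs ['$'] start hle] at h ⊢
  set f := PySem.Chars.find (cs.drop start) ['$'] with hf
  have hne : f ≠ -1 := by intro h0; simp [h0] at h
  have hnn : 0 ≤ f := by have := PySem.Chars.neg_one_le_find (cs.drop start) ['$']; omega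
  rw [if_neg hne]
  obtain ⟨hpre, hmin⟩ := PySem.Chars.find_spec (s := cs.drop start) (sub := ['$']) hnn
  rw [List.drop_drop] at hpre
  rw [singleton_prefix_iff] at hpre
  have hlen : f ≤ ((cs.drop start).length : Int) := PySem.Chars.find_le_length _ _
  have htn : ((start : Int) + f).toNat = start + f.toNat := by omega
  rw [htn]
  have hget : cs[start + f.toNat]? = some '$' := by
    rw [← List.head?_drop]; exact hpre
  have hflt : start + f.toNat < cs.length := by
    by_contra hge
    rw [List.getElem?_eq_none (by omega)] at hget
    simp at hget
  refine ⟨by omega, by omega, by omega, hget, ?_⟩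
  intro j hj1 hj2 hget2
  have := hmin (j - start) (by omega)
  rw [List.drop_drop, singleton_prefix_iff] at this
  rw [Nat.add_sub_cancel' hj1, List.head?_drop] at this
  exact this hget2

-- no dollar sign seen, nothing in progress: state unchanged
theorem foldl_stepB_noDollar (l : List Char) (rs : List (List Char))
    (h : ∀ c ∈ l, c ≠ '$') : l.foldl stepB (rs, none) = (rs, none) := by
  induction l with
  | nil => rfl
  | cons c t ih =>
    have hc : c ≠ '$' := h c (by simp)
    simp only [List.foldl_cons, stepB, hc, if_neg hc]
    exact ih (fun x hx => h x (by simp [hx]))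

-- completed runs only accumulate on the right
theorem foldl_stepB_acc (l : List Char) (rs : List (List Char)) (cur : Option (List Char)) :
    l.foldl stepB (rs, cur) =
      (rs ++ (l.foldl stepB ([], cur)).1, (l.foldl stepB ([], cur)).2) := by
  induction l generalizing rs cur with
  | nil => simp
  | cons c t ih =>
    simp only [List.foldl_cons]
    have hstep : stepB (rs, cur) c =
        (rs ++ (stepB (([] : List (List Char)), cur) c).1, (stepB (([] : List (List Char)), cur) c).2) := by
      unfold stepB
      rcases cur with _ | r <;> by_cases hc : c = '$' <;>
        simp [hc] <;> by_cases hr : r = [] <;>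
        by_cases hd : PySem.Chars.isdigit c <;> simp [hr, hd]
    rw [hstep, ih, ih (stepB ([], cur) c).1 (stepB ([], cur) c).2]
    simp

-- a pure digit block extends the run in progress
theorem foldl_stepB_digits (ds : List Char) (rs : List (List Char)) (r : List Char)
    (h : ∀ c ∈ ds, PySem.Chars.isdigit c) :
    ds.foldl stepB (rs, some r) = (rs, some (r ++ ds)) := by
  induction ds generalizing r with
  | nil => simp
  | cons c t ih =>
    have hd : PySem.Chars.isdigit c := h c (by simp)
    have hc : c ≠ '$' := by
      intro hc; rw [hc] at hd; exact absurd hd (by decide)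
    simp only [List.foldl_cons, stepB, if_neg hc, if_pos hd]
    rw [ih (r ++ [c]) (fun x hx => h x (by simp [hx]))]
    simp

-- when the next char is not a digit (or the input ends), an in-progress run may be finalised now
theorem foldl_stepB_flush (l : List Char) (rs : List (List Char)) (r : List Char)
    (h : l = [] ∨ ∃ c t, l = c :: t ∧ ¬ PySem.Chars.isdigit c) :
    finishRuns (l.foldl stepB (rs, some r)) =
      finishRuns (l.foldl stepB ((if r ≠ [] then rs ++ [r] else rs), none)) := by
  rcases h with rfl | ⟨c, t, rfl, hd⟩
  · simp [finishRuns]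
  · simp only [List.foldl_cons]
    have : stepB (rs, some r) c = stepB ((if r ≠ [] then rs ++ [r] else rs), none) c := by
      unfold stepB
      by_cases hc : c = '$' <;> simp [hc, hd]
    rw [this]

theorem finishRuns_append (rs a : List (List Char)) (o : Option (List Char)) :
    finishRuns (rs ++ a, o) = rs ++ finishRuns (a, o) := by
  cases o with
  | none => rfl
  | some r => by_cases hr : r = [] <;> simp [finishRuns, hr]

theorem loopA_acc (fuel : Nat) (cs : List Char) (start : Nat) (acc : List Int) :
    loopA cs fuel start acc = acc ++ loopA cs fuel start [] := by
  induction fuel generalizing start acc with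
  | zero => simp [loopA]
  | succ f ih =>
    by_cases h : PySem.Chars.findFrom cs ['$'] (start : Int) none = -1
    · simp [loopA, h]
    · simp only [loopA, if_neg h]
      rw [ih _ (if (scanDigits cs (PySem.Chars.findFrom cs ['$'] (start : Int) none + 1).toNat []).1 ≠ [] then
          acc ++ [(PySem.Int.ofChars? (scanDigits cs (PySem.Chars.findFrom cs ['$'] (start : Int) none + 1).toNat []).1).getD 0] else acc),
        ih _ (if (scanDigits cs (PySem.Chars.findFrom cs ['$'] (start : Int) none + 1).toNat []).1 ≠ [] then
          [] ++ [(PySem.Int.ofChars? (scanDigits cs (PySem.Chars.findFrom cs ['$'] (start : Int) none + 1).toNat []).1).getD 0] else [])]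
      by_cases hp : (scanDigits cs (PySem.Chars.findFrom cs ['$'] (start : Int) none + 1).toNat []).1 = [] <;> simp [hp]

theorem main_lemma (fuel : Nat) (cs : List Char) (k : Nat) (hk : k ≤ cs.length)
    (hf : cs.length + 1 ≤ fuel + k) :
    loopA cs fuel k [] =
      (finishRuns ((cs.drop k).foldl stepB ([], none))).map
        (fun r => (PySem.Int.ofChars? r).getD 0) := by
  induction fuel generalizing k with
  | zero => omega
  | succ f ih =>
    by_cases h : PySem.Chars.findFrom cs ['$'] (k : Int) none = -1
    · have hfind : PySem.Chars.find (cs.drop k) ['$'] = -1 := by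
        rw [PySem.Chars.findFrom_natCast cs ['$'] k hk] at h
        by_contra hne
        rw [if_neg hne] at h
        have := PySem.Chars.neg_one_le_find (cs.drop k) ['$']
        omega
      have hnod : ∀ c ∈ cs.drop k, c ≠ '$' := by
        intro c hc hceq
        subst hceq
        rw [← singleton_infix_iff, ← PySem.Chars.find_nonneg_iff] at hc
        omega
      simp only [loopA, if_pos h]
      rw [foldl_stepB_noDollar _ _ hnod]
      simp [finishRuns]
    · obtain ⟨h1, h2, h3, h4, h5, h6⟩ := findFrom_dollar_facts cs k h
      have hgetI : cs[(PySem.Chars.findFrom cs ['$'] (k : Int) none).toNat] = '$' := by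
        rw [List.getElem?_eq_getElem h4] at h5
        exact Option.some.inj h5
      have hdropI : cs.drop (PySem.Chars.findFrom cs ['$'] (k : Int) none).toNat =
          '$' :: cs.drop ((PySem.Chars.findFrom cs ['$'] (k : Int) none).toNat + 1) := by
        rw [List.drop_eq_getElem_cons h4, hgetI]
      have hdecomp : cs.drop k =
          ((cs.drop k).take ((PySem.Chars.findFrom cs ['$'] (k : Int) none).toNat - k)) ++
            '$' :: cs.drop ((PySem.Chars.findFrom cs ['$'] (k : Int) none).toNat + 1) := by
        conv_lhs => rw [← List.take_append_drop ((PySem.Chars.findFrom cs ['$'] (k : Int) none).toNat - k) (cs.drop k)]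
        rw [List.drop_drop]
        have hkk : k + ((PySem.Chars.findFrom cs ['$'] (k : Int) none).toNat - k) =
            (PySem.Chars.findFrom cs ['$'] (k : Int) none).toNat := by omega
        rw [hkk, hdropI]
      have hseg : ∀ c ∈ (cs.drop k).take ((PySem.Chars.findFrom cs ['$'] (k : Int) none).toNat - k), c ≠ '$' := by
        intro c hc hceq
        subst hceq
        obtain ⟨j, hj, hjeq⟩ := List.mem_iff_getElem.mp hc
        have hjlt : k + j < (PySem.Chars.findFrom cs ['$'] (k : Int) none).toNat := by
          simp only [List.length_take, List.length_drop] at hj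
          omega
        have hjlen : k + j < cs.length := by omega
        apply h6 (k + j) (by omega) hjlt
        rw [List.getElem?_eq_getElem hjlen]
        simp only [List.getElem_take, List.getElem_drop] at hjeq
        rw [hjeq]
      have hdsdig : ∀ c ∈ (cs.drop ((PySem.Chars.findFrom cs ['$'] (k : Int) none).toNat + 1)).takeWhile PySem.Chars.isdigit,
          PySem.Chars.isdigit c := fun c hc => List.mem_takeWhile_imp hc
      have hdslen : ((cs.drop ((PySem.Chars.findFrom cs ['$'] (k : Int) none).toNat + 1)).takeWhile PySem.Chars.isdigit).length
          ≤ cs.length - ((PySem.Chars.findFrom cs ['$'] (k : Int) none).toNat + 1) := by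
        have := List.Sublist.length_le (List.takeWhile_sublist (p := PySem.Chars.isdigit)
          (l := cs.drop ((PySem.Chars.findFrom cs ['$'] (k : Int) none).toNat + 1)))
        simpa using this
      have hrest : cs.drop ((PySem.Chars.findFrom cs ['$'] (k : Int) none).toNat + 1 +
          ((cs.drop ((PySem.Chars.findFrom cs ['$'] (k : Int) none).toNat + 1)).takeWhile PySem.Chars.isdigit).length) =
          (cs.drop ((PySem.Chars.findFrom cs ['$'] (k : Int) none).toNat + 1)).dropWhile PySem.Chars.isdigit := by
        rw [dropWhile_eq_drop_len, List.drop_drop]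
      have hsplit : cs.drop ((PySem.Chars.findFrom cs ['$'] (k : Int) none).toNat + 1) =
          ((cs.drop ((PySem.Chars.findFrom cs ['$'] (k : Int) none).toNat + 1)).takeWhile PySem.Chars.isdigit) ++
            cs.drop ((PySem.Chars.findFrom cs ['$'] (k : Int) none).toNat + 1 +
              ((cs.drop ((PySem.Chars.findFrom cs ['$'] (k : Int) none).toNat + 1)).takeWhile PySem.Chars.isdigit).length) := by
        rw [hrest]
        exact (List.takeWhile_append_dropWhile (p := PySem.Chars.isdigit)).symm
      have hB : finishRuns ((cs.drop k).foldl stepB ([], none)) =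
          (if ((cs.drop ((PySem.Chars.findFrom cs ['$'] (k : Int) none).toNat + 1)).takeWhile PySem.Chars.isdigit) ≠ [] then
            [((cs.drop ((PySem.Chars.findFrom cs ['$'] (k : Int) none).toNat + 1)).takeWhile PySem.Chars.isdigit)] else []) ++
          finishRuns ((cs.drop ((PySem.Chars.findFrom cs ['$'] (k : Int) none).toNat + 1 +
            ((cs.drop ((PySem.Chars.findFrom cs ['$'] (k : Int) none).toNat + 1)).takeWhile PySem.Chars.isdigit).length)).foldl stepB ([], none)) := by
        rw [hdecomp, List.foldl_append, foldl_stepB_noDollar _ _ hseg, List.foldl_cons]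
        have hstep0 : stepB (([] : List (List Char)), (none : Option (List Char))) '$' = ([], some []) := by
          simp [stepB]
        rw [hstep0]
        conv_lhs => rw [hsplit]
        rw [List.foldl_append, foldl_stepB_digits _ [] [] hdsdig, List.nil_append]
        rw [foldl_stepB_flush _ [] _ (by rw [hrest]; exact dropWhile_head_cases _ _)]
        rw [foldl_stepB_acc]
        rw [finishRuns_append]
        simp
      rw [hB]
      simp only [loopA, if_neg h]
      rw [scanDigits_eq, loopA_acc]
      have htn : (PySem.Chars.findFrom cs ['$'] (k : Int) none + 1).toNat =
          (PySem.Chars.findFrom cs ['$'] (k : Int) none).toNat + 1 := by omega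
      rw [htn]
      rw [ih ((PySem.Chars.findFrom cs ['$'] (k : Int) none).toNat + 1 +
        ((cs.drop ((PySem.Chars.findFrom cs ['$'] (k : Int) none).toNat + 1)).takeWhile PySem.Chars.isdigit).length)
        (by omega) (by omega)]
      by_cases hds : ((cs.drop ((PySem.Chars.findFrom cs ['$'] (k : Int) none).toNat + 1)).takeWhile PySem.Chars.isdigit) = [] <;>
        simp [hds]

theorem alt_eq (title : String) :
    price_parser_alt title =
      PySem.List.maxD ((finishRuns (title.toList.foldl stepB ([], none))).map
        (fun r => (PySem.Int.ofChars? r).getD 0)) (fun x => x) 0 := by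
  unfold price_parser_alt finishRuns
  rfl

-- ===== VERDICT (by name: the statement is the Claim_ definition above) =====
theorem price_parser_spec : Claim_equal_price_parser := by
  intro title _hdom
  unfold Spec_price_parser
  rw [alt_eq]
  unfold price_parser
  have hm := main_lemma (title.toList.length + 1) title.toList 0 (Nat.zero_le _) (by omega)
  rw [List.drop_zero] at hm
  simp only []
  rw [hm]
  unfold PySem.List.maxD
  cases hls : (finishRuns (title.toList.foldl stepB ([], none))).map
      (fun r => (PySem.Int.ofChars? r).getD 0) with
  | nil => simp [PySem.List.max?]
  | cons x t => simp
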